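-- pv_equiv track=rewrite | github.com/acmeism/RosettaCodeData | Task/Pancake-numbers/Python/pancake-numbers.py | pancake
-- ===== SOURCE A (Python) =====
-- from collections import deque
-- from operator import itemgetter
-- from typing import Tuple
--
-- Pancakes = Tuple[int, ...]
--
-- def flip(pancakes: Pancakes, position: int) -> Pancakes:
--     """Flip the stack of pancakes at the given position."""
--     return tuple([*reversed(pancakes[:position]), *pancakes[position:]])
--
-- def pancake(n: int) -> Tuple[Pancakes, int]:
--     """Return the nth pancake number."""
--     init_stack = tuple(range(1, n + 1))
--     stack_flips = {init_stack: 0}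
--     queue = deque([init_stack])
--
--     while queue:
--         stack = queue.popleft()
--         flips = stack_flips[stack] + 1
--
--         for i in range(2, n + 1):
--             flipped = flip(stack, i)
--             if flipped not in stack_flips:
--                 stack_flips[flipped] = flips
--                 queue.append(flipped)
--
--     return max(stack_flips.items(), key=itemgetter(1))
-- ===== SOURCE B (Python) =====
-- def flip(stack, i):
--     return tuple(reversed(stack[:i])) + stack[i:]
--
-- def pancake(n):
--     """Return the nth pancake number, by level-synchronous BFS over permutations."""
--     cur = [tuple(range(1, n + 1))]
--     visited = {cur[0]}
--     dist = 0
--     while True: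
--         nxt = []
--         for stack in cur:
--             for i in range(2, n + 1):
--                 flipped = flip(stack, i)
--                 if flipped not in visited:
--                     visited.add(flipped)
--                     nxt.append(flipped)
--         if not nxt:
--             return cur[0], dist
--         cur = nxt
--         dist += 1
-- ===== Notes on version B (the rewrite author's own statement) =====
-- stated objective: alternative
-- what changed: A's FIFO-queue BFS with a per-stack distance dict scanned at the end by max(key=itemgetter(1)) is replaced by a level-synchronous BFS that keeps only a visited set and the current frontier, counts the distance once per level, and returns the first stack of the deepest level directly.
import Mathlib
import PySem

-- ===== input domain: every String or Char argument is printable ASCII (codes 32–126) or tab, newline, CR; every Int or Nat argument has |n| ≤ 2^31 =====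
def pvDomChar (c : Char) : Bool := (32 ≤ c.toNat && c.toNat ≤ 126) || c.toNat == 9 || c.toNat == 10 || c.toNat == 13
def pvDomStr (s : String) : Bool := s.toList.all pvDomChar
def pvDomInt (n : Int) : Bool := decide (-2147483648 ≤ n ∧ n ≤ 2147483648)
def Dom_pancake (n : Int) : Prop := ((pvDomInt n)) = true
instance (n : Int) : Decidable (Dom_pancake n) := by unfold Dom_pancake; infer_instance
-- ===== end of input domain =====

-- B re-implements A's dict-of-distances FIFO BFS as a level-synchronous BFS (visited set +
-- frontier per distance), returning the first stack of the deepest level instead of scanning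
-- a dict for the first maximum; same value, alternative decomposition.
--
-- Representation note (proved sound below): Python's O(1) hash dict/set/deque are ported with
-- an O(1)-lookup Std.HashMap/Std.HashSet index plus insertion-ordered lists kept in reverse
-- (and a two-list functional deque for A's queue); the bridge lemmas below prove these states
-- are pointwise in sync with the plain PySem.Dict / PySem.Set / single-list forms of the same
-- loops (loopA, loopB), over which the equivalence is then proved.

-- ===== PORT A =====
def flipA (xs : List Int) (p : Int) : List Int :=
  (PySem.List.slice xs none (some p)).reverse ++ PySem.List.slice xs (some p) none

def innerA2 (flips : Int) (st : List Int)
    (acc : List (List Int × Int) × Std.HashMap (List Int) Int × List (List Int)) (i : Int) :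
    List (List Int × Int) × Std.HashMap (List Int) Int × List (List Int) :=
  let flipped := flipA st i
  if acc.2.1.contains flipped then acc
  else ((flipped, flips) :: acc.1, acc.2.1.insert flipped flips, flipped :: acc.2.2)

def loopA2 (n : Int) :
    Nat → List (List Int × Int) → Std.HashMap (List Int) Int →
      List (List Int) → List (List Int) → List (List Int × Int)
  | 0, rev, _, _, _ => rev
  | f+1, rev, hm, st :: q, back =>
    let flips := (hm[st]?.getD 0) + 1
    let r := (PySem.List.pyRange 2 (n + 1) 1).foldl (innerA2 flips st) (rev, hm, back)
    loopA2 n f r.1 r.2.1 q r.2.2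
  | f+1, rev, hm, [], back =>
    match back.reverse with
    | [] => rev
    | st :: q =>
      let flips := (hm[st]?.getD 0) + 1
      let r := (PySem.List.pyRange 2 (n + 1) 1).foldl (innerA2 flips st) (rev, hm, [])
      loopA2 n f r.1 r.2.1 q r.2.2

def pancake (n : Int) : List Int × Int :=
  let initStack := PySem.List.pyRange 1 (n + 1) 1
  let items := (loopA2 n (2 * Nat.factorial initStack.length + 1)
      [(initStack, 0)] ((∅ : Std.HashMap (List Int) Int).insert initStack 0)
      [initStack] []).reverse
  (PySem.List.max? items (fun p => p.2)).getD ([], 0)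

-- ===== PORT B =====
def flipB (stack : List Int) (i : Int) : List Int :=
  (PySem.List.slice stack none (some i)).reverse ++ PySem.List.slice stack (some i) none

def expandB2 (n : Int) (acc : Std.HashSet (List Int) × List (List Int)) (st : List Int) :
    Std.HashSet (List Int) × List (List Int) :=
  (PySem.List.pyRange 2 (n + 1) 1).foldl (fun a i =>
    let flipped := flipB st i
    if a.1.contains flipped then a
    else (a.1.insert flipped, flipped :: a.2)) acc

def loopB2 (n : Int) :
    Nat → Std.HashSet (List Int) → List (List Int) → Int → List Int × Int
  | 0, _, cur, dist => (PySem.List.pyGetD cur 0 [], dist)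
  | g+1, vis, cur, dist =>
    let r := cur.foldl (expandB2 n) (vis, [])
    if r.2 = [] then (PySem.List.pyGetD cur 0 [], dist)
    else loopB2 n g r.1 r.2.reverse (dist + 1)

def pancake_alt (n : Int) : List Int × Int :=
  let initStack := PySem.List.pyRange 1 (n + 1) 1
  loopB2 n (Nat.factorial initStack.length)
    ((∅ : Std.HashSet (List Int)).insert initStack) [initStack] 0

-- ===== PRECONDITION & SPEC =====
def Spec_pancake (n : Int) (out : List Int × Int) : Prop := out = pancake_alt n
instance (n : Int) (out : List Int × Int) : Decidable (Spec_pancake n out) := by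
  unfold Spec_pancake; infer_instance

-- ===== CLAIM (what is proved, stated in full; the proofs are below) =====
def Claim_equal_pancake : Prop := ∀ (n : Int), Dom_pancake n → Spec_pancake n (pancake n)

-- ===== LEMMAS AND PROOFS =====

-- pure (PySem.Dict / PySem.Set / single-queue) models of the two loops
def innerA (flips : Int) (st : List Int)
    (acc : PySem.Dict (List Int) Int × List (List Int)) (i : Int) :
    PySem.Dict (List Int) Int × List (List Int) :=
  let flipped := flipA st i
  if acc.1.contains flipped then acc
  else (acc.1.insert flipped flips, acc.2 ++ [flipped])

def loopA (n : Int) :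
    Nat → PySem.Dict (List Int) Int → List (List Int) → PySem.Dict (List Int) Int
  | _, d, [] => d
  | 0, d, _ :: _ => d
  | f+1, d, st :: q =>
    let flips := (d.get? st).getD 0 + 1
    let r := (PySem.List.pyRange 2 (n + 1) 1).foldl (innerA flips st) (d, q)
    loopA n f r.1 r.2

theorem loopA_zero (n : Int) (d : PySem.Dict (List Int) Int) (q : List (List Int)) :
    loopA n 0 d q = d := by cases q <;> rfl

theorem bridge2_inner (l : List Int) (flips : Int) (st : List Int) (F : List (List Int)) :
    ∀ (rev : List (List Int × Int)) (hm : Std.HashMap (List Int) Int)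
      (back : List (List Int)) (d : PySem.Dict (List Int) Int),
    rev.reverse = d.items → (∀ k, hm[k]? = d.get? k) →
    ((l.foldl (innerA2 flips st) (rev, hm, back)).1.reverse
        = (l.foldl (innerA flips st) (d, F ++ back.reverse)).1.items)
    ∧ (∀ k, (l.foldl (innerA2 flips st) (rev, hm, back)).2.1[k]?
        = (l.foldl (innerA flips st) (d, F ++ back.reverse)).1.get? k)
    ∧ (F ++ (l.foldl (innerA2 flips st) (rev, hm, back)).2.2.reverse
        = (l.foldl (innerA flips st) (d, F ++ back.reverse)).2) := by
  induction l with
  | nil => intro rev hm back d h1 h2; exact ⟨h1, h2, rfl⟩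
  | cons i l ih =>
    intro rev hm back d h1 h2
    have hcc : hm.contains (flipA st i) = d.contains (flipA st i) := by
      rw [Std.HashMap.contains_eq_isSome_getElem?, h2 (flipA st i),
          PySem.Dict.contains_eq_isSome_get?]
    simp only [List.foldl_cons]
    by_cases hc : d.contains (flipA st i) = true
    · have hcc' : hm.contains (flipA st i) = true := by rw [hcc, hc]
      simp only [innerA2, innerA, hcc', hc, if_true]
      exact ih rev hm back d h1 h2
    · have hcf : d.contains (flipA st i) = false := by simpa using hc
      have hcc' : hm.contains (flipA st i) = false := by rw [hcc, hcf]
      simp only [innerA2, innerA, hcc', hcf, if_false, Bool.false_eq_true]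
      have h1' : ((flipA st i, flips) :: rev).reverse
          = (d.insert (flipA st i) flips).items := by
        rw [List.reverse_cons, h1, PySem.Dict.items_insert_of_not_contains d flips hcf]
      have h2' : ∀ k, (hm.insert (flipA st i) flips)[k]?
          = (d.insert (flipA st i) flips).get? k := by
        intro k
        by_cases hk : k = flipA st i
        · simp [hk]
        · simp [Std.HashMap.getElem?_insert, PySem.Dict.get?_insert, hk,
            Ne.symm hk, h2 k]
      have hq : F ++ back.reverse ++ [flipA st i] = F ++ (flipA st i :: back).reverse := by
        simp
      rw [hq]
      exact ih _ _ _ _ h1' h2'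

theorem bridge2_loop (n : Int) : ∀ (f : Nat) (rev : List (List Int × Int))
    (hm : Std.HashMap (List Int) Int) (front back : List (List Int))
    (d : PySem.Dict (List Int) Int),
    rev.reverse = d.items → (∀ k, hm[k]? = d.get? k) →
    (loopA2 n f rev hm front back).reverse = (loopA n f d (front ++ back.reverse)).items := by
  intro f
  induction f with
  | zero => intro rev hm front back d h1 h2; rw [loopA_zero]; exact h1
  | succ f ih =>
    intro rev hm front back d h1 h2
    cases front with
    | cons st q =>
      obtain ⟨b1, b2, b3⟩ := bridge2_inner (PySem.List.pyRange 2 (n + 1) 1)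
        ((hm[st]?.getD 0) + 1) st q rev hm back d h1 h2
      show (loopA2 n (f+1) rev hm (st :: q) back).reverse = _
      simp only [loopA2, loopA, List.cons_append]
      rw [← h2 st, ← b3]
      exact ih _ _ _ _ _ b1 b2
    | nil =>
      cases hb : back.reverse with
      | nil =>
        have : back = [] := List.reverse_eq_nil_iff.mp hb
        subst this
        simp only [loopA2, hb, List.nil_append]
        exact h1
      | cons st q =>
        obtain ⟨b1, b2, b3⟩ := bridge2_inner (PySem.List.pyRange 2 (n + 1) 1)
          ((hm[st]?.getD 0) + 1) st q rev hm [] d h1 h2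
        simp only [List.reverse_nil, List.append_nil] at b1 b2 b3
        simp only [loopA2, hb, loopA, List.nil_append]
        rw [← h2 st, ← b3]
        exact ih _ _ _ _ _ b1 b2

def expandB (n : Int) (acc : PySem.Set (List Int) × List (List Int)) (st : List Int) :
    PySem.Set (List Int) × List (List Int) :=
  (PySem.List.pyRange 2 (n + 1) 1).foldl (fun a i =>
    let flipped := flipB st i
    if PySem.Set.contains a.1 flipped then a
    else (PySem.Set.add a.1 flipped, a.2 ++ [flipped])) acc

def loopB (n : Int) :
    Nat → PySem.Set (List Int) → List (List Int) → Int → List Int × Int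
  | 0, _, cur, dist => (PySem.List.pyGetD cur 0 [], dist)
  | g+1, vis, cur, dist =>
    let r := cur.foldl (expandB n) (vis, [])
    if r.2 = [] then (PySem.List.pyGetD cur 0 [], dist)
    else loopB n g r.1 r.2 (dist + 1)

theorem contains_add_eq (s : PySem.Set (List Int)) (x k : List Int) :
    PySem.Set.contains (PySem.Set.add s x) k = (x == k || PySem.Set.contains s k) := by
  rw [Bool.eq_iff_iff]
  simp only [Bool.or_eq_true, beq_iff_eq, PySem.Set.contains_iff, PySem.Set.mem_add]
  constructor
  · rintro (h | h)
    exacts [Or.inr h, Or.inl h.symm]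
  · rintro (h | h)
    exacts [Or.inr h.symm, Or.inl h]

theorem bridgeB2_inner (l : List Int) (st : List Int) :
    ∀ (vis : Std.HashSet (List Int)) (s : PySem.Set (List Int))
      (a2 : List (List Int)) (as_ : List (List Int)),
    (∀ k, vis.contains k = PySem.Set.contains s k) → a2.reverse = as_ →
    (∀ k, (l.foldl (fun a i =>
        let flipped := flipB st i
        if a.1.contains flipped then a
        else (a.1.insert flipped, flipped :: a.2)) (vis, a2)).1.contains k
      = PySem.Set.contains (l.foldl (fun a i =>
        let flipped := flipB st i
        if PySem.Set.contains a.1 flipped then a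
        else (PySem.Set.add a.1 flipped, a.2 ++ [flipped])) (s, as_)).1 k)
    ∧ ((l.foldl (fun a i =>
        let flipped := flipB st i
        if a.1.contains flipped then a
        else (a.1.insert flipped, flipped :: a.2)) (vis, a2)).2.reverse
      = (l.foldl (fun a i =>
        let flipped := flipB st i
        if PySem.Set.contains a.1 flipped then a
        else (PySem.Set.add a.1 flipped, a.2 ++ [flipped])) (s, as_)).2) := by
  induction l with
  | nil => intro vis s a2 as_ h1 h2; exact ⟨h1, h2⟩
  | cons i l ih =>
    intro vis s a2 as_ h1 h2
    simp only [List.foldl_cons]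
    by_cases hc : PySem.Set.contains s (flipB st i) = true
    · have hc2 : vis.contains (flipB st i) = true := by rw [h1, hc]
      simp only [hc, hc2, if_true]
      exact ih vis s a2 as_ h1 h2
    · have hcf : PySem.Set.contains s (flipB st i) = false := by simpa using hc
      have hc2 : vis.contains (flipB st i) = false := by rw [h1, hcf]
      simp only [hcf, hc2, if_false, Bool.false_eq_true]
      refine ih _ _ _ _ ?_ ?_
      · intro k
        rw [Std.HashSet.contains_insert, contains_add_eq, h1 k]
      · rw [List.reverse_cons, h2]

theorem bridgeB2_level (n : Int) (L : List (List Int)) :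
    ∀ (vis : Std.HashSet (List Int)) (s : PySem.Set (List Int))
      (a2 : List (List Int)) (as_ : List (List Int)),
    (∀ k, vis.contains k = PySem.Set.contains s k) → a2.reverse = as_ →
    (∀ k, (L.foldl (expandB2 n) (vis, a2)).1.contains k
        = PySem.Set.contains (L.foldl (expandB n) (s, as_)).1 k)
    ∧ ((L.foldl (expandB2 n) (vis, a2)).2.reverse = (L.foldl (expandB n) (s, as_)).2) := by
  induction L with
  | nil => intro vis s a2 as_ h1 h2; exact ⟨h1, h2⟩
  | cons st L ih =>
    intro vis s a2 as_ h1 h2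
    simp only [List.foldl_cons]
    obtain ⟨c1, c2⟩ := bridgeB2_inner (PySem.List.pyRange 2 (n + 1) 1) st vis s a2 as_ h1 h2
    have he2 : expandB2 n (vis, a2) st
        = ((PySem.List.pyRange 2 (n + 1) 1).foldl (fun a i =>
            let flipped := flipB st i
            if a.1.contains flipped then a
            else (a.1.insert flipped, flipped :: a.2)) (vis, a2)) := rfl
    have he : expandB n (s, as_) st
        = ((PySem.List.pyRange 2 (n + 1) 1).foldl (fun a i =>
            let flipped := flipB st i
            if PySem.Set.contains a.1 flipped then a
            else (PySem.Set.add a.1 flipped, a.2 ++ [flipped])) (s, as_)) := rfl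
    rw [he2, he]
    exact ih _ _ _ _ c1 c2

theorem bridgeB2_loop (n : Int) : ∀ (g : Nat) (vis : Std.HashSet (List Int))
    (s : PySem.Set (List Int)) (cur : List (List Int)) (dist : Int),
    (∀ k, vis.contains k = PySem.Set.contains s k) →
    loopB2 n g vis cur dist = loopB n g s cur dist := by
  intro g
  induction g with
  | zero => intro vis s cur dist _; rfl
  | succ g ih =>
    intro vis s cur dist h1
    obtain ⟨c1, c2⟩ := bridgeB2_level n cur vis s [] [] h1 rfl
    show (let r := cur.foldl (expandB2 n) (vis, [])
      if r.2 = [] then (PySem.List.pyGetD cur 0 [], dist)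
      else loopB2 n g r.1 r.2.reverse (dist + 1)) = _
    show _ = (let r := cur.foldl (expandB n) (s, [])
      if r.2 = [] then (PySem.List.pyGetD cur 0 [], dist)
      else loopB n g r.1 r.2 (dist + 1))
    simp only
    by_cases hnil : (cur.foldl (expandB2 n) (vis, [])).2 = []
    · have hnil2 : (cur.foldl (expandB n) (s, [])).2 = [] := by
        rw [← c2, hnil, List.reverse_nil]
      rw [if_pos hnil, if_pos hnil2]
    · have hnil2 : ¬ (cur.foldl (expandB n) (s, [])).2 = [] := by
        rw [← c2]
        simpa using hnil
      rw [if_neg hnil, if_neg hnil2, ← c2]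
      exact ih _ _ _ _ c1

def procOne (n flips : Int) (acc : PySem.Dict (List Int) Int × List (List Int))
    (st : List Int) : PySem.Dict (List Int) Int × List (List Int) :=
  (PySem.List.pyRange 2 (n + 1) 1).foldl (innerA flips st) acc

def permBound (n : Int) : Nat := ((PySem.List.pyRange 1 (n + 1) 1).permutations).length

def maxStep : Option (List Int × Int) → (List Int × Int) → Option (List Int × Int) :=
  fun acc x => match acc with
    | none => some x
    | some m => if m.2 < x.2 then some x else some m

theorem innerA_state (l : List Int) (v : Int) (st : List Int)
    (d : PySem.Dict (List Int) Int) (q : List (List Int)) :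
    l.foldl (innerA v st) (d, q)
      = ((l.foldl (innerA v st) (d, [])).1, q ++ (l.foldl (innerA v st) (d, [])).2) := by
  induction l generalizing d q with
  | nil => simp
  | cons i l ih =>
    simp only [List.foldl_cons]
    by_cases hc : d.contains (flipA st i) = true
    · simp only [innerA, hc, if_true]
      exact ih d q
    · simp only [innerA, hc, if_false, Bool.false_eq_true]
      rw [ih (d.insert (flipA st i) v) (q ++ [flipA st i]),
          ih (d.insert (flipA st i) v) ([] ++ [flipA st i])]
      simp

theorem procOne_state (n v : Int) (st : List Int)
    (d : PySem.Dict (List Int) Int) (q : List (List Int)) :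
    procOne n v (d, q) st
      = ((procOne n v (d, []) st).1, q ++ (procOne n v (d, []) st).2) := by
  simpa only [procOne] using innerA_state _ v st d q

theorem flipA_perm (xs : List Int) (p : Int) (hp : 0 ≤ p) : (flipA xs p).Perm xs := by
  unfold flipA
  rw [PySem.List.slice_to _ hp, PySem.List.slice_from _ hp]
  calc ((xs.take p.toNat).reverse ++ xs.drop p.toNat).Perm
        (xs.take p.toNat ++ xs.drop p.toNat) :=
        ((xs.take p.toNat).reverse_perm).append_right _
    _ = xs := List.take_append_drop _ _

theorem innerA_spec (l : List Int) (v : Int) (st : List Int) :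
    ∀ (d : PySem.Dict (List Int) Int), (∀ i ∈ l, (0:Int) ≤ i) → d.keys.Nodup →
    ((l.foldl (innerA v st) (d, [])).1.items
        = d.items ++ (l.foldl (innerA v st) (d, [])).2.map (fun s => (s, v)))
    ∧ ((l.foldl (innerA v st) (d, [])).1.keys = d.keys ++ (l.foldl (innerA v st) (d, [])).2)
    ∧ (l.foldl (innerA v st) (d, [])).1.keys.Nodup
    ∧ (∀ k w, d.get? k = some w → (l.foldl (innerA v st) (d, [])).1.get? k = some w)
    ∧ (∀ x ∈ (l.foldl (innerA v st) (d, [])).2, x.Perm st) := by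
  induction l with
  | nil => intro d _ hnd; simp [hnd]
  | cons i l ih =>
    intro d hnn hnd
    simp only [List.foldl_cons]
    by_cases hc : d.contains (flipA st i) = true
    · simp only [innerA, hc, if_true]
      exact ih d (fun j hj => hnn j (List.mem_cons_of_mem _ hj)) hnd
    · simp only [innerA, hc, if_false, Bool.false_eq_true]
      have hfl : flipA st i ∉ d.keys := by
        intro hm
        exact hc ((PySem.Dict.contains_iff_mem_keys d _).mpr hm)
      have hc' : d.contains (flipA st i) = false := by simpa using hc
      have hnd' : (d.insert (flipA st i) v).keys.Nodup :=
        PySem.Dict.nodup_keys_insert d _ v hnd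
      obtain ⟨i1, i2, i3, i4, i5⟩ :=
        ih (d.insert (flipA st i) v) (fun j hj => hnn j (List.mem_cons_of_mem _ hj)) hnd'
      rw [innerA_state l v st _ ([] ++ [flipA st i])]
      refine ⟨?_, ?_, i3, ?_, ?_⟩
      · simp only [List.nil_append, List.map_append, List.map_cons, List.map_nil]
        rw [i1, PySem.Dict.items_insert_of_not_contains d v hc']
        simp
      · simp only [List.nil_append]
        rw [i2, PySem.Dict.keys_insert_of_not_contains d v hc']
        simp
      · intro k w hk
        refine i4 k w ?_
        have hkmem : k ∈ d.keys :=
          PySem.Dict.mem_keys_of_mem_items d (PySem.Dict.mem_items_of_get?_eq_some d hk)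
        have : k ≠ flipA st i := fun h => hfl (h ▸ hkmem)
        rw [PySem.Dict.get?_insert_of_ne d v this]
        exact hk
      · intro x hx
        simp only [List.nil_append, List.mem_append, List.mem_cons, List.not_mem_nil,
          or_false] at hx
        rcases hx with h | h
        · exact (h ▸ flipA_perm st i (hnn i (List.mem_cons_self ..)))
        · exact i5 x h

theorem procOne_spec (n : Int) (v : Int) (st : List Int)
    (d : PySem.Dict (List Int) Int) (hnd : d.keys.Nodup) :
    ((procOne n v (d, []) st).1.items
        = d.items ++ (procOne n v (d, []) st).2.map (fun s => (s, v)))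
    ∧ ((procOne n v (d, []) st).1.keys = d.keys ++ (procOne n v (d, []) st).2)
    ∧ (procOne n v (d, []) st).1.keys.Nodup
    ∧ (∀ k w, d.get? k = some w → (procOne n v (d, []) st).1.get? k = some w)
    ∧ (∀ x ∈ (procOne n v (d, []) st).2, x.Perm st) := by
  exact innerA_spec _ v st d
    (fun i hi => by have := (PySem.List.mem_pyRange_one.mp hi).1; omega) hnd

theorem levelA_state (n v : Int) (L : List (List Int)) :
    ∀ (d : PySem.Dict (List Int) Int) (q : List (List Int)),
    L.foldl (procOne n v) (d, q)
      = ((L.foldl (procOne n v) (d, [])).1, q ++ (L.foldl (procOne n v) (d, [])).2) := by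
  induction L with
  | nil => intro d q; simp
  | cons st L ih =>
    intro d q
    simp only [List.foldl_cons]
    rw [procOne_state n v st d q, procOne_state n v st d []]
    simp only [List.nil_append]
    rw [ih (procOne n v (d, []) st).1 (q ++ (procOne n v (d, []) st).2),
        ih (procOne n v (d, []) st).1 ((procOne n v (d, []) st).2)]
    simp

theorem levelA_spec (n : Int) (v : Int) (init0 : List Int) (L : List (List Int)) :
    ∀ (d : PySem.Dict (List Int) Int), d.keys.Nodup → (∀ st ∈ L, st.Perm init0) →
    ((L.foldl (procOne n v) (d, [])).1.items
        = d.items ++ (L.foldl (procOne n v) (d, [])).2.map (fun s => (s, v)))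
    ∧ ((L.foldl (procOne n v) (d, [])).1.keys
        = d.keys ++ (L.foldl (procOne n v) (d, [])).2)
    ∧ (L.foldl (procOne n v) (d, [])).1.keys.Nodup
    ∧ (∀ k w, d.get? k = some w → (L.foldl (procOne n v) (d, [])).1.get? k = some w)
    ∧ (∀ x ∈ (L.foldl (procOne n v) (d, [])).2, x.Perm init0) := by
  induction L with
  | nil => intro d hnd _; simp [hnd]
  | cons st L ih =>
    intro d hnd hL
    obtain ⟨p1, p2, p3, p4, p5⟩ := procOne_spec n v st d hnd
    obtain ⟨j1, j2, j3, j4, j5⟩ := ih (procOne n v (d, []) st).1 p3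
      (fun s hs => hL s (List.mem_cons_of_mem _ hs))
    simp only [List.foldl_cons]
    rw [levelA_state n v L (procOne n v (d, []) st).1 (procOne n v (d, []) st).2]
    refine ⟨?_, ?_, j3, ?_, ?_⟩
    · rw [j1, p1]; simp
    · rw [j2, p2]; simp
    · intro k w hk; exact j4 k w (p4 k w hk)
    · intro x hx
      rcases List.mem_append.mp hx with h | h
      · exact (p5 x h).trans (hL st (List.mem_cons_self ..))
      · exact j5 x h

theorem bridge_inner (l : List Int) (st : List Int) (v : Int) :
    ∀ (d : PySem.Dict (List Int) Int) (q : List (List Int)),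
    l.foldl (fun a i =>
        let flipped := flipB st i
        if PySem.Set.contains a.1 flipped then a
        else (PySem.Set.add a.1 flipped, a.2 ++ [flipped])) (d.keys, q)
      = ((l.foldl (innerA v st) (d, q)).1.keys, (l.foldl (innerA v st) (d, q)).2) := by
  induction l with
  | nil => intro d q; simp
  | cons i l ih =>
    intro d q
    have hfl : flipB st i = flipA st i := rfl
    simp only [List.foldl_cons]
    by_cases hm : flipA st i ∈ d.keys
    · have h1 : PySem.Set.contains d.keys (flipA st i) = true :=
        (PySem.Set.contains_iff _ _).mpr hm
      have h2 : d.contains (flipA st i) = true :=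
        (PySem.Dict.contains_iff_mem_keys d _).mpr hm
      simp only [hfl, h1, h2, if_true, innerA]
      exact ih d q
    · have h1 : PySem.Set.contains d.keys (flipA st i) = false := by
        by_contra hcon
        exact hm ((PySem.Set.contains_iff _ _).mp (by simpa using hcon))
      have h2 : d.contains (flipA st i) = false := by
        by_contra hcon
        exact hm ((PySem.Dict.contains_iff_mem_keys d _).mp (by simpa using hcon))
      simp only [hfl, h1, h2, innerA, if_false, Bool.false_eq_true]
      rw [PySem.Set.add_of_not_mem hm,
          ← PySem.Dict.keys_insert_of_not_contains d v h2]
      exact ih (d.insert (flipA st i) v) (q ++ [flipA st i])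

theorem bridge_level (n : Int) (L : List (List Int)) (v : Int) :
    ∀ (d : PySem.Dict (List Int) Int) (q : List (List Int)),
    L.foldl (expandB n) (d.keys, q)
      = ((L.foldl (procOne n v) (d, q)).1.keys, (L.foldl (procOne n v) (d, q)).2) := by
  induction L with
  | nil => intro d q; simp
  | cons st L ih =>
    intro d q
    simp only [List.foldl_cons, expandB]
    rw [bridge_inner _ st v d q]
    have : procOne n v (d, q) st
        = ((PySem.List.pyRange 2 (n+1) 1).foldl (innerA v st) (d, q)) := rfl
    rw [← this]
    obtain ⟨d', q'⟩ := procOne n v (d, q) st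
    exact ih d' q'

theorem loopA_block (n v : Int) (L : List (List Int)) :
    ∀ (d : PySem.Dict (List Int) Int) (M : List (List Int)) (f : Nat),
    d.keys.Nodup → (∀ st ∈ L, d.get? st = some v) →
    loopA n (f + L.length) d (L ++ M)
      = loopA n f (L.foldl (procOne n (v + 1)) (d, M)).1
          (L.foldl (procOne n (v + 1)) (d, M)).2 := by
  induction L with
  | nil => intro d M f _ _; simp
  | cons st L ih =>
    intro d M f hnd hv
    have hst : d.get? st = some v := hv st (List.mem_cons_self ..)
    have hfu : f + (st :: L).length = (f + L.length) + 1 := by simp; omega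
    rw [hfu]
    show loopA n ((f + L.length) + 1) d (st :: (L ++ M)) = _
    have hstep : loopA n ((f + L.length) + 1) d (st :: (L ++ M))
        = loopA n (f + L.length)
            ((PySem.List.pyRange 2 (n+1) 1).foldl (innerA ((d.get? st).getD 0 + 1) st) (d, L ++ M)).1
            ((PySem.List.pyRange 2 (n+1) 1).foldl (innerA ((d.get? st).getD 0 + 1) st) (d, L ++ M)).2 := rfl
    rw [hstep, hst]
    simp only [Option.getD_some]
    have hsplit : ((PySem.List.pyRange 2 (n+1) 1).foldl (innerA (v + 1) st) (d, L ++ M))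
        = procOne n (v+1) (d, L ++ M) st := rfl
    rw [hsplit, procOne_state n (v+1) st d (L ++ M)]
    obtain ⟨q1, q2, q3, q4, q5⟩ := procOne_spec n (v+1) st d hnd
    have happ : L ++ M ++ (procOne n (v+1) (d, []) st).2
        = L ++ (M ++ (procOne n (v+1) (d, []) st).2) := by simp
    rw [happ]
    rw [ih (procOne n (v+1) (d, []) st).1 (M ++ (procOne n (v+1) (d, []) st).2) f q3
        (fun s hs => q4 s v (hv s (List.mem_cons_of_mem _ hs)))]
    have : (st :: L).foldl (procOne n (v+1)) (d, M)
        = L.foldl (procOne n (v+1)) ((procOne n (v+1) (d, []) st).1, M ++ (procOne n (v+1) (d, []) st).2) := by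
      simp only [List.foldl_cons]
      rw [procOne_state n (v+1) st d M]
    rw [this]

theorem max?_eq_foldl_maxStep (xs : List (List Int × Int)) :
    PySem.List.max? xs (fun p => p.2) = xs.foldl maxStep none := by
  unfold PySem.List.max?
  congr 1
  funext acc x
  cases acc <;> rfl

theorem maxStep_keep_lt (P : List (List Int × Int)) (v : Int) :
    ∀ (acc : Option (List Int × Int)),
    (acc = none ∨ ∃ p, acc = some p ∧ p.2 < v) → (∀ p ∈ P, p.2 < v) →
    (P.foldl maxStep acc = none
      ∨ ∃ p, P.foldl maxStep acc = some p ∧ p.2 < v) := by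
  induction P with
  | nil => intro acc h _; simpa using h
  | cons x P ih =>
    intro acc hacc hP
    have hx : x.2 < v := hP x (List.mem_cons_self ..)
    refine ih (maxStep acc x) ?_ (fun p hp => hP p (List.mem_cons_of_mem _ hp))
    rcases hacc with h | ⟨p, hp, hlt⟩
    · exact Or.inr ⟨x, by simp [h, maxStep], hx⟩
    · rw [hp]
      by_cases hc : p.2 < x.2
      · exact Or.inr ⟨x, by simp [maxStep, hc], hx⟩
      · exact Or.inr ⟨p, by simp [maxStep, hc], hlt⟩

theorem maxStep_keep_le (t : List (List Int × Int)) :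
    ∀ (m : List Int × Int), (∀ x ∈ t, x.2 ≤ m.2) →
    t.foldl maxStep (some m) = some m := by
  induction t with
  | nil => intro m _; rfl
  | cons x t ih =>
    intro m hm
    have hx : ¬ m.2 < x.2 := not_lt.mpr (hm x (List.mem_cons_self ..))
    simp only [List.foldl_cons, maxStep, hx, if_false]
    exact ih m (fun y hy => hm y (List.mem_cons_of_mem _ hy))

theorem max?_first_block (P : List (List Int × Int)) (h : List Int)
    (t : List (List Int)) (v : Int) (hP : ∀ p ∈ P, p.2 < v) :
    PySem.List.max? (P ++ (h, v) :: t.map (fun s => (s, v))) (fun p => p.2)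
      = some (h, v) := by
  rw [max?_eq_foldl_maxStep, List.foldl_append, List.foldl_cons]
  have hstep : maxStep (P.foldl maxStep none) (h, v) = some (h, v) := by
    rcases maxStep_keep_lt P v none (Or.inl rfl) hP with hc | ⟨p, hp, hlt⟩
    · simp [hc, maxStep]
    · simp [hp, maxStep, hlt]
  rw [hstep]
  exact maxStep_keep_le _ (h, v) (by simp)

theorem length_le_permBound (n : Int) (ks : List (List Int)) (hnd : ks.Nodup)
    (hp : ∀ k ∈ ks, k.Perm (PySem.List.pyRange 1 (n + 1) 1)) :
    ks.length ≤ permBound n := by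
  have hsub : ks ⊆ (PySem.List.pyRange 1 (n + 1) 1).permutations :=
    fun k hk => List.mem_permutations.mpr (hp k hk)
  exact (List.subperm_of_subset hnd hsub).length_le

theorem loopA_nil (n : Int) (f : Nat) (d : PySem.Dict (List Int) Int) :
    loopA n f d [] = d := by cases f <;> rfl

theorem stopAll (n v : Int) (d : PySem.Dict (List Int) Int)
    (L : List (List Int)) (P : List (List Int × Int)) (fA fB : Nat)
    (h1 : d.items = P ++ L.map (fun s => (s, v)))
    (h2 : ∀ p ∈ P, p.2 < v) (h3 : L ≠ [])
    (hnd : d.keys.Nodup) (hv : ∀ st ∈ L, d.get? st = some v)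
    (hLp : ∀ st ∈ L, st.Perm (PySem.List.pyRange 1 (n + 1) 1))
    (hnew : (L.foldl (procOne n (v + 1)) (d, [])).2 = [])
    (hfA : L.length ≤ fA) :
    PySem.List.max? (loopA n fA d L).items (fun p => p.2)
      = some (loopB n fB d.keys L v) := by
  obtain ⟨h0, t, rfl⟩ : ∃ h0 t, L = h0 :: t := by
    cases L with
    | nil => exact absurd rfl h3
    | cons a b => exact ⟨a, b, rfl⟩
  have hA : loopA n fA d (h0 :: t) = ((h0 :: t).foldl (procOne n (v + 1)) (d, [])).1 := by
    have hfa : fA = (fA - (h0 :: t).length) + (h0 :: t).length := by omega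
    rw [hfa]
    have := loopA_block n v (h0 :: t) d [] (fA - (h0 :: t).length) hnd hv
    rw [List.append_nil] at this
    rw [this, hnew, loopA_nil]
  have hitems : (((h0 :: t).foldl (procOne n (v + 1)) (d, [])).1).items
      = P ++ (h0, v) :: t.map (fun s => (s, v)) := by
    have hi := (levelA_spec n (v + 1) (PySem.List.pyRange 1 (n + 1) 1) (h0 :: t) d hnd hLp).1
    rw [hnew] at hi
    simpa [h1] using hi
  have hmax : PySem.List.max? (loopA n fA d (h0 :: t)).items (fun p => p.2)
      = some (h0, v) := by
    rw [hA, hitems]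
    exact max?_first_block P h0 t v h2
  have hB : loopB n fB d.keys (h0 :: t) v = (h0, v) := by
    cases fB with
    | zero => simp [loopB, PySem.List.pyGetD_zero_cons]
    | succ g =>
      show (let r := (h0 :: t).foldl (expandB n) (d.keys, [])
        if r.2 = [] then (PySem.List.pyGetD (h0 :: t) 0 [], v)
        else loopB n g r.1 r.2 (v + 1)) = _
      rw [bridge_level n (h0 :: t) (v + 1) d []]
      simp only [hnew, if_true]
      simp [PySem.List.pyGetD_zero_cons]
  rw [hmax, hB]

theorem mainLoop (n : Int) (m : Nat) :
    ∀ (d : PySem.Dict (List Int) Int) (L : List (List Int)) (v : Int)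
      (P : List (List Int × Int)) (fA fB : Nat),
    d.items = P ++ L.map (fun s => (s, v)) →
    (∀ p ∈ P, p.2 < v) →
    L ≠ [] →
    d.keys.Nodup →
    (∀ k ∈ d.keys, k.Perm (PySem.List.pyRange 1 (n + 1) 1)) →
    permBound n - d.keys.length ≤ m →
    L.length + 2 * (permBound n - d.keys.length) ≤ fA →
    permBound n + 1 - d.keys.length ≤ fB →
    PySem.List.max? (loopA n fA d L).items (fun p => p.2)
      = some (loopB n fB d.keys L v) := by
  induction m with
  | zero =>
    intro d L v P fA fB h1 h2 h3 h4 h5 h6 h7 h8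
    have hvmem : ∀ st ∈ L, (st, v) ∈ d.items := by
      intro st hst
      rw [h1]
      exact List.mem_append_right _ (List.mem_map.mpr ⟨st, hst, rfl⟩)
    have hv : ∀ st ∈ L, d.get? st = some v := fun st hst =>
      PySem.Dict.get?_of_mem_items d (hvmem st hst) h4
    have hLp : ∀ st ∈ L, st.Perm (PySem.List.pyRange 1 (n + 1) 1) := fun st hst =>
      h5 st (PySem.Dict.mem_keys_of_mem_items d (hvmem st hst))
    obtain ⟨e1, e2, e3, e4, e5⟩ :=
      levelA_spec n (v + 1) (PySem.List.pyRange 1 (n + 1) 1) L d h4 hLp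
    have hkp' : ∀ k ∈ (L.foldl (procOne n (v + 1)) (d, [])).1.keys,
        k.Perm (PySem.List.pyRange 1 (n + 1) 1) := by
      intro k hk
      rw [e2] at hk
      rcases List.mem_append.mp hk with h | h
      · exact h5 k h
      · exact e5 k h
    have hbound := length_le_permBound n d.keys h4 h5
    have hbound' := length_le_permBound n (L.foldl (procOne n (v + 1)) (d, [])).1.keys e3 hkp'
    have hlenE : (L.foldl (procOne n (v + 1)) (d, [])).1.keys.length
        = d.keys.length + (L.foldl (procOne n (v + 1)) (d, [])).2.length := by
      rw [e2, List.length_append]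
    by_cases hnew : (L.foldl (procOne n (v + 1)) (d, [])).2 = []
    · exact stopAll n v d L P fA fB h1 h2 h3 h4 hv hLp hnew (by omega)
    · exfalso
      have : 0 < (L.foldl (procOne n (v + 1)) (d, [])).2.length := List.length_pos_iff.mpr hnew
      omega
  | succ m ih =>
    intro d L v P fA fB h1 h2 h3 h4 h5 h6 h7 h8
    have hvmem : ∀ st ∈ L, (st, v) ∈ d.items := by
      intro st hst
      rw [h1]
      exact List.mem_append_right _ (List.mem_map.mpr ⟨st, hst, rfl⟩)
    have hv : ∀ st ∈ L, d.get? st = some v := fun st hst =>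
      PySem.Dict.get?_of_mem_items d (hvmem st hst) h4
    have hLp : ∀ st ∈ L, st.Perm (PySem.List.pyRange 1 (n + 1) 1) := fun st hst =>
      h5 st (PySem.Dict.mem_keys_of_mem_items d (hvmem st hst))
    obtain ⟨e1, e2, e3, e4, e5⟩ :=
      levelA_spec n (v + 1) (PySem.List.pyRange 1 (n + 1) 1) L d h4 hLp
    have hkp' : ∀ k ∈ (L.foldl (procOne n (v + 1)) (d, [])).1.keys,
        k.Perm (PySem.List.pyRange 1 (n + 1) 1) := by
      intro k hk
      rw [e2] at hk
      rcases List.mem_append.mp hk with h | h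
      · exact h5 k h
      · exact e5 k h
    have hbound := length_le_permBound n d.keys h4 h5
    have hbound' := length_le_permBound n (L.foldl (procOne n (v + 1)) (d, [])).1.keys e3 hkp'
    have hlenE : (L.foldl (procOne n (v + 1)) (d, [])).1.keys.length
        = d.keys.length + (L.foldl (procOne n (v + 1)) (d, [])).2.length := by
      rw [e2, List.length_append]
    by_cases hnew : (L.foldl (procOne n (v + 1)) (d, [])).2 = []
    · exact stopAll n v d L P fA fB h1 h2 h3 h4 hv hLp hnew (by omega)
    · have hE2 : 0 < (L.foldl (procOne n (v + 1)) (d, [])).2.length := List.length_pos_iff.mpr hnew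
      have hA : loopA n fA d L
          = loopA n (fA - L.length) (L.foldl (procOne n (v + 1)) (d, [])).1
              (L.foldl (procOne n (v + 1)) (d, [])).2 := by
        have hb := loopA_block n v L d [] (fA - L.length) h4 hv
        rw [List.append_nil] at hb
        rw [← hb]
        congr 1
        omega
      rw [hA]
      obtain ⟨g, rfl⟩ : ∃ g, fB = g + 1 := ⟨fB - 1, by omega⟩
      have hBstep : loopB n (g + 1) d.keys L v
          = loopB n g (L.foldl (procOne n (v + 1)) (d, [])).1.keys
              (L.foldl (procOne n (v + 1)) (d, [])).2 (v + 1) := by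
        show (let r := L.foldl (expandB n) (d.keys, [])
          if r.2 = [] then (PySem.List.pyGetD L 0 [], v)
          else loopB n g r.1 r.2 (v + 1)) = _
        rw [bridge_level n L (v + 1) d []]
        simp only [hnew, if_false]
      rw [hBstep]
      refine ih (L.foldl (procOne n (v + 1)) (d, [])).1
        (L.foldl (procOne n (v + 1)) (d, [])).2 (v + 1)
        (P ++ L.map (fun s => (s, v))) (fA - L.length) g ?_ ?_ hnew e3 hkp' ?_ ?_ ?_
      · rw [e1, h1, List.append_assoc]
      · intro p hp
        rcases List.mem_append.mp hp with h | h
        · exact lt_trans (h2 p h) (by omega)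
        · obtain ⟨s, _, rfl⟩ := List.mem_map.mp h
          omega
      · omega
      · omega
      · omega

theorem model_eq (n : Int) :
    (PySem.List.max? (loopA n (2 * Nat.factorial (PySem.List.pyRange 1 (n + 1) 1).length + 1)
        ((PySem.Dict.empty).insert (PySem.List.pyRange 1 (n + 1) 1) 0)
        [PySem.List.pyRange 1 (n + 1) 1]).items (fun p => p.2)).getD ([], 0)
    = loopB n (Nat.factorial (PySem.List.pyRange 1 (n + 1) 1).length)
        (PySem.Set.ofList [PySem.List.pyRange 1 (n + 1) 1])
        [PySem.List.pyRange 1 (n + 1) 1] 0 := by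
  have hpb : permBound n = Nat.factorial (PySem.List.pyRange 1 (n + 1) 1).length := by
    rw [permBound, List.length_permutations]
  have hmain := mainLoop n (permBound n)
    ((PySem.Dict.empty).insert (PySem.List.pyRange 1 (n + 1) 1) 0)
    [PySem.List.pyRange 1 (n + 1) 1] 0 []
    (2 * Nat.factorial (PySem.List.pyRange 1 (n + 1) 1).length + 1)
    (Nat.factorial (PySem.List.pyRange 1 (n + 1) 1).length)
    (by rw [PySem.Dict.items_insert_of_not_contains _ _ (PySem.Dict.contains_empty _)]
        rfl)
    (by intro p hp; cases hp)
    (by simp)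
    (by rw [PySem.Dict.keys_insert_of_not_contains _ _ (PySem.Dict.contains_empty _),
            PySem.Dict.keys_empty]
        simp)
    (by rw [PySem.Dict.keys_insert_of_not_contains _ _ (PySem.Dict.contains_empty _),
            PySem.Dict.keys_empty]
        intro k hk
        simp at hk
        rw [hk])
    (by rw [PySem.Dict.keys_insert_of_not_contains _ _ (PySem.Dict.contains_empty _),
            PySem.Dict.keys_empty]
        simp)
    (by rw [PySem.Dict.keys_insert_of_not_contains _ _ (PySem.Dict.contains_empty _),
            PySem.Dict.keys_empty, hpb]
        simp only [List.length_append, List.length_cons, List.length_nil]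
        omega)
    (by rw [PySem.Dict.keys_insert_of_not_contains _ _ (PySem.Dict.contains_empty _),
            PySem.Dict.keys_empty, hpb]
        simp only [List.length_append, List.length_cons, List.length_nil]
        omega)
  have hset : PySem.Set.ofList [PySem.List.pyRange 1 (n + 1) 1]
      = [PySem.List.pyRange 1 (n + 1) 1] :=
    PySem.Set.ofList_eq_self_of_nodup _ (List.nodup_singleton _)
  show (PySem.List.max? (loopA n _ _ _).items (fun p => p.2)).getD ([], 0) = _
  rw [hmain]
  show loopB n (PySem.List.pyRange 1 (n + 1) 1).length.factorial
      ((PySem.Dict.empty.insert (PySem.List.pyRange 1 (n + 1) 1) 0).keys)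
      [PySem.List.pyRange 1 (n + 1) 1] 0
    = loopB n (PySem.List.pyRange 1 (n + 1) 1).length.factorial
      (PySem.Set.ofList [PySem.List.pyRange 1 (n + 1) 1])
      [PySem.List.pyRange 1 (n + 1) 1] 0
  rw [hset, PySem.Dict.keys_insert_of_not_contains _ _ (PySem.Dict.contains_empty _),
      PySem.Dict.keys_empty]
  simp

theorem pancake_eq (n : Int) : pancake n = pancake_alt n := by
  have h1 : [(PySem.List.pyRange 1 (n + 1) 1, (0 : Int))].reverse
      = ((PySem.Dict.empty).insert (PySem.List.pyRange 1 (n + 1) 1) 0).items := by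
    rw [PySem.Dict.items_insert_of_not_contains _ _ (PySem.Dict.contains_empty _)]
    rfl
  have h2 : ∀ k, ((∅ : Std.HashMap (List Int) Int).insert (PySem.List.pyRange 1 (n + 1) 1) 0)[k]?
      = ((PySem.Dict.empty).insert (PySem.List.pyRange 1 (n + 1) 1) 0).get? k := by
    intro k
    by_cases hk : k = PySem.List.pyRange 1 (n + 1) 1
    · simp [hk]
    · simp [PySem.Dict.get?_insert, hk, Ne.symm hk, PySem.Dict.get?_empty]
  have hA := bridge2_loop n (2 * Nat.factorial (PySem.List.pyRange 1 (n + 1) 1).length + 1)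
      [(PySem.List.pyRange 1 (n + 1) 1, (0 : Int))]
      ((∅ : Std.HashMap (List Int) Int).insert (PySem.List.pyRange 1 (n + 1) 1) 0)
      [PySem.List.pyRange 1 (n + 1) 1] []
      ((PySem.Dict.empty).insert (PySem.List.pyRange 1 (n + 1) 1) 0) h1 h2
  simp only [List.reverse_nil, List.append_nil] at hA
  have hofl : PySem.Set.ofList [PySem.List.pyRange 1 (n + 1) 1]
      = PySem.Set.add PySem.Set.empty (PySem.List.pyRange 1 (n + 1) 1) := rfl
  have h3 : ∀ k, ((∅ : Std.HashSet (List Int)).insert (PySem.List.pyRange 1 (n + 1) 1)).contains k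
      = PySem.Set.contains (PySem.Set.ofList [PySem.List.pyRange 1 (n + 1) 1]) k := by
    intro k
    rw [Std.HashSet.contains_insert, hofl, contains_add_eq, Std.HashSet.contains_empty]
    rfl
  have hB := bridgeB2_loop n (Nat.factorial (PySem.List.pyRange 1 (n + 1) 1).length)
      ((∅ : Std.HashSet (List Int)).insert (PySem.List.pyRange 1 (n + 1) 1))
      (PySem.Set.ofList [PySem.List.pyRange 1 (n + 1) 1])
      [PySem.List.pyRange 1 (n + 1) 1] 0 h3
  show (PySem.List.max? ((loopA2 n
      (2 * Nat.factorial (PySem.List.pyRange 1 (n + 1) 1).length + 1)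
      [(PySem.List.pyRange 1 (n + 1) 1, (0 : Int))]
      ((∅ : Std.HashMap (List Int) Int).insert (PySem.List.pyRange 1 (n + 1) 1) 0)
      [PySem.List.pyRange 1 (n + 1) 1] []).reverse) (fun p => p.2)).getD ([], 0)
    = pancake_alt n
  rw [hA, model_eq n, ← hB]
  rfl

-- ===== VERDICT (by name: the statement is the Claim_ definition above) =====
theorem pancake_spec : Claim_equal_pancake := by
  intro n _
  unfold Spec_pancake
  exact pancake_eq n
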